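-- pv_equiv track=rewrite | github.com/milselarch/jsimp | BinNumber.py | fill_bits
-- ===== SOURCE A (Python) =====
-- def fill_bits(num, num_bits=32, negative=False):
--     str_num = bin(num)
--     bits = [0] * num_bits
--
--     for k, digit in enumerate(str_num[::-1]):
--         if digit == 'b':
--             break
--
--         digit = 1 if digit == '1' else 0
--         bits[-1-k] = digit
--
--     if negative:
--         assert bits[0] == 0
--         bits[0] = 1
--
--     return bits
-- ===== SOURCE B (Python) =====
-- def fill_bits(num, num_bits=32, negative=False):
--     n = abs(num)
--     rev = []
--     while True:
--         rev.append(n & 1)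
--         n >>= 1
--         if n == 0:
--             break
--     bits = [0] * (num_bits - len(rev)) + rev[::-1]
--     if negative:
--         bits[0] = 1
--     return bits
-- ===== Notes on version B (the rewrite author's own statement) =====
-- stated objective: idiomatic
-- what changed: B extracts bits arithmetically (n & 1 / n >>= 1) into an LSB-first list and builds the result by padding+reversal, instead of formatting the number with bin() and scanning the reversed string's characters with negative-index writes into a preallocated list.
import Mathlib
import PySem

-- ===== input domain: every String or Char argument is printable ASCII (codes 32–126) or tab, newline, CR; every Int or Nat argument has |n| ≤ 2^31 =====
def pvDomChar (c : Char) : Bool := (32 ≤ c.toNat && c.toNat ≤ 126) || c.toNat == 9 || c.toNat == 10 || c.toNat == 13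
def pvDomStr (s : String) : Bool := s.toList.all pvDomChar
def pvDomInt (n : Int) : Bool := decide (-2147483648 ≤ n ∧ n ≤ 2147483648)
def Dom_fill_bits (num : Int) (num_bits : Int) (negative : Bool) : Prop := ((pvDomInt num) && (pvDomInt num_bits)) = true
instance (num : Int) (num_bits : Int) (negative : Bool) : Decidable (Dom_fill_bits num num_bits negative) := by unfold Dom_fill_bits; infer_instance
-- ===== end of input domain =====

-- B replaces A's bin()-string parsing by arithmetic bit extraction (idiomatic; same cost).

-- ===== PORT A =====
-- binary digits of n, most significant first ([] for 0); hand port of the digit part of bin() — exact for naturals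
def binChars (n : Nat) : List Char :=
  if n = 0 then []
  else binChars (n / 2) ++ [if n % 2 = 1 then '1' else '0']
  decreasing_by exact Nat.div_lt_self (Nat.pos_of_ne_zero (by assumption)) (by norm_num)

-- bin(num) as a character list: '-' sign for negatives, then "0b", then the magnitude's digits — exact for ints
def pyBinList (num : Int) : List Char :=
  (if num < 0 then ['-'] else []) ++ ['0', 'b'] ++ (if num.natAbs = 0 then ['0'] else binChars num.natAbs)

-- bits[-1-k] = v : Python negative-index write (no-op when Python would raise IndexError; Pre_ excludes that)
def setNeg (bits : List Int) (k : Nat) (v : Int) : List Int :=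
  if k < bits.length then bits.set (bits.length - 1 - k) v else bits

-- the enumerate loop over str_num[::-1] with its break on 'b'
def loopA (bits : List Int) (chars : List Char) (k : Nat) : List Int :=
  match chars with
  | [] => bits
  | c :: rest =>
    if c = 'b' then bits
    else loopA (setNeg bits k (if c = '1' then 1 else 0)) rest (k + 1)

def fill_bits (num : Int) (num_bits : Int) (negative : Bool) : List Int :=
  let str_num := pyBinList num
  let bits := List.replicate num_bits.toNat 0
  let bits := loopA bits str_num.reverse 0
  -- assert bits[0] == 0 holds on Pre_; bits[0] = 1:
  if negative then bits.set 0 1 else bits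

-- ===== PORT B =====
-- the do-while loop of Source B: rev.append(n & 1); n >>= 1; until n == 0 (LSB first)
def revBits (n : Nat) : List Int :=
  if h : n / 2 = 0 then [(n % 2 : Int)]
  else (n % 2 : Int) :: revBits (n / 2)
  decreasing_by exact Nat.div_lt_self (Nat.pos_of_ne_zero (fun hz => h (by simp [hz]))) (by norm_num)

def fill_bits_alt (num : Int) (num_bits : Int) (negative : Bool) : List Int :=
  let rev := revBits num.natAbs
  let bits := List.replicate (num_bits - rev.length).toNat 0 ++ rev.reverse
  if negative then bits.set 0 1 else bits

-- ===== PRECONDITION & SPEC =====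
-- Pre_ is exactly where Python A returns: num's magnitude must fit in num_bits binary digits
-- (bin always writes at least one digit, and an oversized num indexes past the front: IndexError),
-- and with negative=True the top slot must still be 0 (else the assert fails: AssertionError).
def Pre_fill_bits (num : Int) (num_bits : Int) (negative : Bool) : Prop :=
  ((num.natAbs.log2 + 1 : Int) ≤ num_bits) ∧
  (negative = true → num = 0 ∨ (num.natAbs.log2 + 1 : Int) ≤ num_bits - 1)
instance (num : Int) (num_bits : Int) (negative : Bool) : Decidable (Pre_fill_bits num num_bits negative) := by unfold Pre_fill_bits; infer_instance

def pvWitness_fill_bits : Int × Int × Bool := (-11, 8, true)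

def Spec_fill_bits (num : Int) (num_bits : Int) (negative : Bool) (out : List Int) : Prop := out = fill_bits_alt num num_bits negative
instance (num : Int) (num_bits : Int) (negative : Bool) (out : List Int) : Decidable (Spec_fill_bits num num_bits negative out) := by unfold Spec_fill_bits; infer_instance

-- ===== CLAIM (what is proved, stated in full; the proofs are below) =====
def Claim_equal_fill_bits : Prop := ∀ (num : Int) (num_bits : Int) (negative : Bool), Dom_fill_bits num num_bits negative → Pre_fill_bits num num_bits negative → Spec_fill_bits num num_bits negative (fill_bits num num_bits negative)

-- ===== LEMMAS AND PROOFS =====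

def chval (c : Char) : Int := if c = '1' then 1 else 0

lemma b_not_mem_binChars (n : Nat) : 'b' ∉ binChars n := by
  induction n using binChars.induct with
  | case1 => simp [binChars]
  | case2 n h ih =>
    rw [binChars, if_neg h]
    simp only [List.mem_append, List.mem_singleton]
    rintro (hm | hm)
    · exact ih hm
    · split at hm <;> simp_all

lemma revBits_eq (n : Nat) :
    revBits n = ((if n = 0 then ['0'] else binChars n).map chval).reverse := by
  induction n using revBits.induct with
  | case1 n h =>
    have h2 : n < 2 := by omega
    interval_cases n
    · simp [revBits, chval]
    · simp [revBits, binChars, chval]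
  | case2 n h ih =>
    have hn2 : n / 2 ≠ 0 := h
    have hn : n ≠ 0 := fun hz => h (by simp [hz])
    rw [revBits, dif_neg h]
    conv_rhs => rw [if_neg hn, binChars, if_neg hn]
    rw [ih, if_neg hn2]
    simp only [List.map_append, List.reverse_append, List.map_cons, List.map_nil,
      List.reverse_cons, List.reverse_nil, List.nil_append, List.singleton_append]
    congr 1
    rcases Nat.mod_two_eq_zero_or_one n with hm | hm <;> simp [hm, chval] <;> omega

lemma revBits_length (n : Nat) : (revBits n).length = n.log2 + 1 := by
  induction n using revBits.induct with
  | case1 n h =>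
    have h2 : n < 2 := by omega
    interval_cases n <;> simp [revBits, Nat.log2_def]
  | case2 n h ih =>
    have h2 : 2 ≤ n := by omega
    rw [revBits, dif_neg h, Nat.log2_def, if_pos h2]
    simp [ih]

lemma loopA_eq (cs : List Char) : ∀ (bits : List Int) (k : Nat) (rest : List Char),
    'b' ∉ cs → k + cs.length ≤ bits.length →
    loopA bits (cs ++ 'b' :: rest) k =
      bits.take (bits.length - k - cs.length) ++ (cs.map chval).reverse
        ++ bits.drop (bits.length - k) := by
  induction cs with
  | nil =>
    intro bits k rest _ hk
    simp [loopA, List.take_append_drop]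
  | cons c cs ih =>
    intro bits k rest hb hk
    have hcb : c ≠ 'b' := fun hc => hb (by simp [hc])
    have hkN : k < bits.length := by simp at hk; omega
    rw [List.cons_append, loopA, if_neg hcb]
    rw [show (if c = '1' then (1:Int) else 0) = chval c from rfl]
    rw [setNeg, if_pos hkN]
    set bits' := bits.set (bits.length - 1 - k) (chval c) with hbits'
    have hlen : bits'.length = bits.length := by simp [hbits']
    rw [ih bits' (k + 1) rest (fun hm => hb (by simp [hm])) (by simp [hlen]; simp at hk; omega)]
    have hidx : bits.length - 1 - k = bits.length - (k + 1) := by omega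
    have htake : bits'.take (bits'.length - (k + 1) - cs.length)
        = bits.take (bits.length - k - (c :: cs).length) := by
      apply List.ext_getElem
      · simp [hlen]
        omega
      · intro i h1 h2
        simp only [List.getElem_take, hbits', List.getElem_set]
        rw [if_neg]
        simp [hlen] at h1
        omega
    have hdrop : bits'.drop (bits'.length - (k + 1)) = chval c :: bits.drop (bits.length - k) := by
      rw [hlen, List.drop_eq_getElem_cons (by omega)]
      congr 1
      · simp only [hbits', List.getElem_set]
        rw [if_pos (by omega)]
      · apply List.ext_getElem
        · simp [hbits']; omega
        · intro i h1 h2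
          simp only [List.getElem_drop, hbits', List.getElem_set]
          rw [if_neg (by omega)]
          have : bits.length - (k + 1) + 1 + i = bits.length - k + i := by omega
          simp [this]
    rw [htake, hdrop]
    simp [List.append_assoc]

-- ===== VERDICT (by name: the statement is the Claim_ definition above) =====
theorem fill_bits_spec : Claim_equal_fill_bits := by
  intro num num_bits negative _ hpre
  unfold Spec_fill_bits fill_bits fill_bits_alt
  have hpre1 := hpre.1
  set n := num.natAbs with hn
  set digits := (if n = 0 then ['0'] else binChars n) with hdig
  -- the reversed bin string is digits.reverse ++ 'b' :: rest
  have hsplit : (pyBinList num).reverse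
      = digits.reverse ++ 'b' :: ('0' :: (if num < 0 then ['-'] else [])) := by
    unfold pyBinList
    rw [← hn, ← hdig]
    simp [List.reverse_append]
    split <;> simp
  have hlenrev : (revBits n).length = digits.length := by
    rw [revBits_eq n, ← hdig]; simp
  have hlog : (revBits n).length = n.log2 + 1 := revBits_length n
  have hle : digits.length ≤ num_bits.toNat := by omega
  have hbmem : 'b' ∉ digits.reverse := by
    rw [hdig]
    split
    · simp
    · simp only [List.mem_reverse]; exact b_not_mem_binChars n
  dsimp only
  rw [hsplit, loopA_eq digits.reverse (List.replicate num_bits.toNat 0) 0 _ hbmem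
        (by simpa using hle)]
  simp only [List.length_replicate]
  have hbody : (List.replicate num_bits.toNat (0:Int)).take (num_bits.toNat - 0 - digits.reverse.length)
      ++ (digits.reverse.map chval).reverse
      ++ (List.replicate num_bits.toNat (0:Int)).drop (num_bits.toNat - 0)
      = List.replicate (num_bits - ((revBits n).length : Int)).toNat 0 ++ (revBits n).reverse := by
    rw [revBits_eq n, ← hdig]
    simp only [List.length_reverse, List.take_replicate, List.drop_replicate,
      Nat.sub_zero, Nat.sub_self, List.replicate_zero, List.append_nil, List.map_reverse,
      List.reverse_reverse]
    congr 2
    have e1 : (List.map chval digits).reverse.length = digits.length := by simp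
    have e2 : digits.reverse.length = digits.length := by simp
    have e3 : (List.map chval digits).length = digits.length := by simp
    omega
  rw [hbody]

theorem fill_bits_pvwitness_ok :
    Dom_fill_bits pvWitness_fill_bits.1 pvWitness_fill_bits.2.1 pvWitness_fill_bits.2.2 ∧
      Pre_fill_bits pvWitness_fill_bits.1 pvWitness_fill_bits.2.1 pvWitness_fill_bits.2.2 := by
  decide
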